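-- pv_equiv track=rewrite | github.com/edt-yxz-zzd/python3_src | seed/data_funcs/rngs.py | detect_iter_ranges
-- ===== SOURCE A (Python) =====
-- def valid_range(range, /):
--     if type(range) is not tuple:
--         return False
--     begin, end = range
--     if not type(begin) is int is type(end):
--         return False
--     return begin < end
--
-- def detect_iter_ranges(iterable, /):
--     r"""
--     0 | 1 | 3 | 7 | 15
--     not iterable<rng> | is iterable<rng> | is sorted_rngs | is touch_ranges | is nontouch_ranges
--     #"""
--     it = iter(iterable)
--     for pre in it:
--         if not valid_range(pre):
--             return 0
--         break
--     else:
--         return 15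
--
--     def _15():
--         return pre[-1] < curr[0]
--     def _7():
--         return pre[-1] <= curr[0]
--     def _3():
--         return pre <= curr
--     def _1():
--         return True
--     fs = [_15, _7, _3, _1]
--     rs = [15, 7, 3, 1]
--     ps = zip(fs, rs)
--     f,r = next(ps)
--
--     for curr in it:
--         if not valid_range(curr):
--             return 0
--         while not f():
--             f,r = next(ps)
--         pre = curr
--     return r
-- ===== SOURCE B (Python) =====
-- def valid_range(range, /):
--     if type(range) is not tuple:
--         return False
--     begin, end = range
--     if not type(begin) is int is type(end):
--         return False
--     return begin < end
--
-- def detect_iter_ranges(iterable, /):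
--     it = iter(iterable)
--     try:
--         pre = next(it)
--     except StopIteration:
--         return 15
--     if not valid_range(pre):
--         return 0
--     result = 15
--     for curr in it:
--         if not valid_range(curr):
--             return 0
--         if pre[1] < curr[0]:
--             level = 15
--         elif pre[1] <= curr[0]:
--             level = 7
--         elif pre <= curr:
--             level = 3
--         else:
--             level = 1
--         result = min(result, level)
--         pre = curr
--     return result
-- ===== Notes on version B (the rewrite author's own statement) =====
-- stated objective: simpler
-- what changed: Replaces A's stateful descent through a zipped list of predicate closures (fs/rs, while-not-f next(ps)) with a direct per-pair level classification combined by min with a running result, validating each element as it goes.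
import Mathlib
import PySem

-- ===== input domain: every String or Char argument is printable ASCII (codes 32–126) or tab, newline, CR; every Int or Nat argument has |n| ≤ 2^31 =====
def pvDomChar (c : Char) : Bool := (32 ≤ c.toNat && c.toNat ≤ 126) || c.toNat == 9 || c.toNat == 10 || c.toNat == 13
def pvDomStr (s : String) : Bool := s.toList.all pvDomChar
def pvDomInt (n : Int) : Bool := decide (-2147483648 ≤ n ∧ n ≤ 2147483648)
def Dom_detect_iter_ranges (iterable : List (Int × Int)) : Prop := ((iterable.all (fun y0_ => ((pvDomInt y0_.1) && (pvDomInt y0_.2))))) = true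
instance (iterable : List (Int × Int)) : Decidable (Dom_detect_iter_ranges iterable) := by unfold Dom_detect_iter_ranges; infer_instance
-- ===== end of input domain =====

-- B replaces A's stateful predicate-list descent (fs/rs, zip, while next(ps)) with a direct
-- per-pair classification taking min with a running result; objective: simpler.

-- ===== PORT A =====
-- valid_range: the type checks are always true for inputs of type List (Int × Int), leaving begin < end.
def pvValidRange (r : Int × Int) : Bool := decide (r.1 < r.2)

-- the predicate list fs = [_15, _7, _3, _1], indexed
def pvFAt : Nat → (Int × Int) → (Int × Int) → Bool
  | 0, p, c => decide (p.2 < c.1)                               -- _15: pre[-1] < curr[0]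
  | 1, p, c => decide (p.2 ≤ c.1)                               -- _7 : pre[-1] <= curr[0]
  | 2, p, c => decide (p.1 < c.1 ∨ (p.1 = c.1 ∧ p.2 ≤ c.2))     -- _3 : pre <= curr (tuple lex order)
  | _, _, _ => true                                             -- _1

-- the result list rs = [15, 7, 3, 1], indexed
def pvRsAt : Nat → Int
  | 0 => 15
  | 1 => 7
  | 2 => 3
  | _ => 1

-- the inner `while not f(): f,r = next(ps)`; pvFAt 3 is always true so the iterator never exhausts
def pvAdvance (k : Nat) (p c : Int × Int) : Nat :=
  if 3 ≤ k then k
  else if pvFAt k p c then k else pvAdvance (k + 1) p c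
termination_by 3 - k

-- the main `for curr in it` loop, carrying the current predicate index and pre
def pvALoop : List (Int × Int) → Nat → (Int × Int) → Int
  | [], k, _ => pvRsAt k
  | c :: tl, k, p => if ¬ pvValidRange c then 0 else pvALoop tl (pvAdvance k p c) c

def detect_iter_ranges (iterable : List (Int × Int)) : Int :=
  match iterable with
  | [] => 15                                   -- for…else: empty iterable
  | p :: tl => if ¬ pvValidRange p then 0 else pvALoop tl 0 p

-- ===== PORT B =====
def pvLevelOf (p c : Int × Int) : Int :=
  if p.2 < c.1 then 15
  else if p.2 ≤ c.1 then 7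
  else if p.1 < c.1 ∨ (p.1 = c.1 ∧ p.2 ≤ c.2) then 3
  else 1

def pvBLoop : (Int × Int) → Int → List (Int × Int) → Int
  | _, res, [] => res
  | p, res, c :: tl => if ¬ pvValidRange c then 0 else pvBLoop c (min res (pvLevelOf p c)) tl

def detect_iter_ranges_alt (iterable : List (Int × Int)) : Int :=
  match iterable with
  | [] => 15
  | p :: tl => if ¬ pvValidRange p then 0 else pvBLoop p 15 tl

-- ===== PRECONDITION & SPEC =====
def Spec_detect_iter_ranges (iterable : List (Int × Int)) (out : Int) : Prop := out = detect_iter_ranges_alt iterable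
instance (iterable : List (Int × Int)) (out : Int) : Decidable (Spec_detect_iter_ranges iterable out) := by unfold Spec_detect_iter_ranges; infer_instance

-- ===== CLAIM (what is proved, stated in full; the proofs are below) =====
def Claim_equal_detect_iter_ranges : Prop := ∀ (iterable : List (Int × Int)), Dom_detect_iter_ranges iterable → Spec_detect_iter_ranges iterable (detect_iter_ranges iterable)

-- ===== LEMMAS AND PROOFS =====
lemma pvAdvance_unfold (k : Nat) (p c : Int × Int) :
    pvAdvance k p c = if 3 ≤ k then k else if pvFAt k p c then k else pvAdvance (k + 1) p c := by
  rw [pvAdvance]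

lemma pvAdvance_three (p c : Int × Int) : pvAdvance 3 p c = 3 := by
  rw [pvAdvance_unfold]; norm_num

lemma pvAdvance_le (k : Nat) (hk : k ≤ 3) (p c : Int × Int) : pvAdvance k p c ≤ 3 := by
  have a3 : pvAdvance 3 p c ≤ 3 := by rw [pvAdvance_three]
  have a2 : pvAdvance 2 p c ≤ 3 := by
    rw [pvAdvance_unfold]; split_ifs <;> first | exact a3 | norm_num
  have a1 : pvAdvance 1 p c ≤ 3 := by
    rw [pvAdvance_unfold]; split_ifs <;> first | exact a2 | norm_num
  have a0 : pvAdvance 0 p c ≤ 3 := by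
    rw [pvAdvance_unfold]; split_ifs <;> first | exact a1 | norm_num
  interval_cases k <;> assumption

lemma pvAdvance_min (k : Nat) (hk : k ≤ 3) (p c : Int × Int) (hp : p.1 < p.2) :
    pvRsAt (pvAdvance k p c) = min (pvRsAt k) (pvLevelOf p c) := by
  have h0 := pvAdvance_unfold 0 p c
  have h1 := pvAdvance_unfold 1 p c
  have h2 := pvAdvance_unfold 2 p c
  have h3 := pvAdvance_three p c
  interval_cases k <;>
    simp only [h0, h1, h2, h3, pvFAt, pvLevelOf, pvRsAt, decide_eq_true_eq] <;>
    norm_num <;> split_ifs <;> first | rfl | omega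

lemma pvLoop_eq (tl : List (Int × Int)) : ∀ (k : Nat), k ≤ 3 → ∀ (p : Int × Int), p.1 < p.2 →
    pvALoop tl k p = pvBLoop p (pvRsAt k) tl := by
  induction tl with
  | nil => intro k _ p _; rfl
  | cons c tl ih =>
    intro k hk p hp
    simp only [pvALoop, pvBLoop]
    by_cases hc : pvValidRange c
    · simp only [hc, not_true, ite_false]
      rw [ih _ (pvAdvance_le k hk p c) c (by simpa [pvValidRange] using hc),
          pvAdvance_min k hk p c hp]
    · simp [hc]

-- ===== VERDICT (by name: the statement is the Claim_ definition above) =====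
theorem detect_iter_ranges_spec : Claim_equal_detect_iter_ranges := by
  intro iterable _
  unfold Spec_detect_iter_ranges detect_iter_ranges detect_iter_ranges_alt
  match iterable with
  | [] => rfl
  | p :: tl =>
    by_cases hp : pvValidRange p
    · simpa [hp] using pvLoop_eq tl 0 (by norm_num) p (by simpa [pvValidRange] using hp)
    · simp [hp]
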